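-- pv_equiv track=rewrite | github.com/Toru1968/mahjong-performance-analysis | analyzed_report.py | get_dora_tiles
-- ===== SOURCE A (Python) =====
-- def get_dora_tiles(dorahyo) -> list:
-- # 牌番号の範囲（1~9は数牌、31~37は字牌）
--     if not dorahyo:
--         return []
--
--     dora = []
--     for tile in dorahyo:
--     # 数牌（マンズ1〜9：11〜19、ピンズ21〜29、ソーズ31〜39）
--         if 11 <= tile <= 19 or 21 <= tile <= 29 or 31 <= tile <= 39:
--             if tile % 10 == 9:
--                 dora.append(tile - 8)  # 9の次は1
--             else:
--                 dora.append(tile + 1)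
--     # 字牌（東31、南32、西33、北34、白35、発36、中37）
--         elif 41 <= tile <= 44:
--             if tile == 44:
--                 dora.append(41)  # 中の次は東
--             else:
--                 dora.append(tile + 1)
--         elif 45 <= tile <= 47:
--             if tile == 47:
--                 dora.append(45)  # 中の次は東
--             else:
--                 dora.append(tile + 1)
--         else:
--             dora.append(None)  # 想定外の牌
--
--     return dora
-- ===== SOURCE B (Python) =====
-- CYCLES = [
--     list(range(11, 20)),   # manzu 1-9
--     list(range(21, 30)),   # pinzu 1-9
--     list(range(31, 40)),   # souzu 1-9
--     [41, 42, 43, 44],      # winds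
--     [45, 46, 47],          # dragons
-- ]
--
--
-- def _next_in_cycle(tile):
--     for cycle in CYCLES:
--         if tile in cycle:
--             return cycle[(cycle.index(tile) + 1) % len(cycle)]
--     return None
--
--
-- def get_dora_tiles(dorahyo) -> list:
--     return [_next_in_cycle(tile) for tile in dorahyo]
-- ===== Notes on version B (the rewrite author's own statement) =====
-- stated objective: alternative
-- what changed: Instead of A's branch chain with wrap-around arithmetic per tile, B represents the tile order as explicit cycle lists and computes each dora as the successor element in the cycle containing the tile (index + 1 modulo cycle length), scanning the cycles and returning None when no cycle contains the tile.
import Mathlib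
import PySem

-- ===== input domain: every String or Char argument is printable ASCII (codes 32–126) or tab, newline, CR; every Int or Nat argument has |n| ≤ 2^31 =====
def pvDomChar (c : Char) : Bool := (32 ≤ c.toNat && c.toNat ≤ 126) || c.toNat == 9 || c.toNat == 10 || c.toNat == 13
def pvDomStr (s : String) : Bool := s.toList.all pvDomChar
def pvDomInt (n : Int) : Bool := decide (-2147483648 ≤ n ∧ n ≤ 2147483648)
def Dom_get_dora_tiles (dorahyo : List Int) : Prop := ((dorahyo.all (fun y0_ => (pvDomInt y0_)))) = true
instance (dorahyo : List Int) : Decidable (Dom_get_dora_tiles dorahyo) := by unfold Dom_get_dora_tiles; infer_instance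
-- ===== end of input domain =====

-- B replaces A's per-tile branch chain by the successor element in explicit cycle lists (alternative, same cost).

-- ===== PORT A =====
def get_dora_tiles (dorahyo : List Int) : List (Option Int) :=
  if dorahyo = [] then []
  else
    dorahyo.foldl (fun dora tile =>
      if (11 ≤ tile ∧ tile ≤ 19) ∨ (21 ≤ tile ∧ tile ≤ 29) ∨ (31 ≤ tile ∧ tile ≤ 39) then
        if PySem.Int.mod tile 10 = 9 then dora ++ [some (tile - 8)]
        else dora ++ [some (tile + 1)]
      else if 41 ≤ tile ∧ tile ≤ 44 then
        if tile = 44 then dora ++ [some 41]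
        else dora ++ [some (tile + 1)]
      else if 45 ≤ tile ∧ tile ≤ 47 then
        if tile = 47 then dora ++ [some 45]
        else dora ++ [some (tile + 1)]
      else dora ++ [none]) []

-- ===== PORT B =====
-- the module-level cycle lists of Source B
def doraCycles : List (List Int) :=
  [PySem.List.pyRange 11 20 1, PySem.List.pyRange 21 30 1, PySem.List.pyRange 31 40 1,
   [41, 42, 43, 44], [45, 46, 47]]

-- the 'for cycle in CYCLES' loop of _next_in_cycle, with its early return
def nextInCycleAux (tile : Int) : List (List Int) → Option Int
  | [] => none
  | cycle :: rest =>
    if tile ∈ cycle then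
      match PySem.List.index? cycle tile with
      | some i => PySem.List.pyGet? cycle (PySem.Int.mod ((i : Int) + 1) (cycle.length : Int))
      | none => none
    else nextInCycleAux tile rest

def nextInCycle (tile : Int) : Option Int := nextInCycleAux tile doraCycles

def get_dora_tiles_alt (dorahyo : List Int) : List (Option Int) :=
  dorahyo.map (fun tile => nextInCycle tile)

-- ===== PRECONDITION & SPEC =====
def Spec_get_dora_tiles (dorahyo : List Int) (out : List (Option Int)) : Prop := out = get_dora_tiles_alt dorahyo
instance (dorahyo : List Int) (out : List (Option Int)) : Decidable (Spec_get_dora_tiles dorahyo out) := by unfold Spec_get_dora_tiles; infer_instance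

-- ===== CLAIM =====
def Claim_equal_get_dora_tiles : Prop := ∀ (dorahyo : List Int), Dom_get_dora_tiles dorahyo → Spec_get_dora_tiles dorahyo (get_dora_tiles dorahyo)

-- ===== LEMMAS AND PROOFS =====

-- A's per-tile value as a function (proof helper)
def aVal (tile : Int) : Option Int :=
  if (11 ≤ tile ∧ tile ≤ 19) ∨ (21 ≤ tile ∧ tile ≤ 29) ∨ (31 ≤ tile ∧ tile ≤ 39) then
    if PySem.Int.mod tile 10 = 9 then some (tile - 8) else some (tile + 1)
  else if 41 ≤ tile ∧ tile ≤ 44 then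
    if tile = 44 then some 41 else some (tile + 1)
  else if 45 ≤ tile ∧ tile ≤ 47 then
    if tile = 47 then some 45 else some (tile + 1)
  else none

-- the concrete cycles
theorem doraCycles_eq : doraCycles =
    [[11, 12, 13, 14, 15, 16, 17, 18, 19], [21, 22, 23, 24, 25, 26, 27, 28, 29],
     [31, 32, 33, 34, 35, 36, 37, 38, 39], [41, 42, 43, 44], [45, 46, 47]] := by
  decide

-- A's per-tile value equals B's cycle-successor, for every Int tile
theorem tile_eq (tile : Int) : aVal tile = nextInCycle tile := by
  by_cases h : 11 ≤ tile ∧ tile ≤ 47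
  · obtain ⟨h1, h2⟩ := h
    interval_cases tile <;> decide
  · have hn : nextInCycle tile = none := by
      unfold nextInCycle
      rw [doraCycles_eq]
      simp only [nextInCycleAux, List.mem_cons, List.not_mem_nil, or_false]
      have : ¬ (tile = 11 ∨ tile = 12 ∨ tile = 13 ∨ tile = 14 ∨ tile = 15 ∨ tile = 16 ∨
          tile = 17 ∨ tile = 18 ∨ tile = 19) := by omega
      rw [if_neg this]
      have : ¬ (tile = 21 ∨ tile = 22 ∨ tile = 23 ∨ tile = 24 ∨ tile = 25 ∨ tile = 26 ∨
          tile = 27 ∨ tile = 28 ∨ tile = 29) := by omega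
      rw [if_neg this]
      have : ¬ (tile = 31 ∨ tile = 32 ∨ tile = 33 ∨ tile = 34 ∨ tile = 35 ∨ tile = 36 ∨
          tile = 37 ∨ tile = 38 ∨ tile = 39) := by omega
      rw [if_neg this]
      have : ¬ (tile = 41 ∨ tile = 42 ∨ tile = 43 ∨ tile = 44) := by omega
      rw [if_neg this]
      have : ¬ (tile = 45 ∨ tile = 46 ∨ tile = 47) := by omega
      rw [if_neg this]
    rw [hn]
    unfold aVal
    split_ifs <;> first | rfl | omega

theorem step_eq (dora : List (Option Int)) (tile : Int) :
    (if (11 ≤ tile ∧ tile ≤ 19) ∨ (21 ≤ tile ∧ tile ≤ 29) ∨ (31 ≤ tile ∧ tile ≤ 39) then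
        if PySem.Int.mod tile 10 = 9 then dora ++ [some (tile - 8)]
        else dora ++ [some (tile + 1)]
      else if 41 ≤ tile ∧ tile ≤ 44 then
        if tile = 44 then dora ++ [some 41]
        else dora ++ [some (tile + 1)]
      else if 45 ≤ tile ∧ tile ≤ 47 then
        if tile = 47 then dora ++ [some 45]
        else dora ++ [some (tile + 1)]
      else dora ++ [none]) = dora ++ [aVal tile] := by
  unfold aVal
  split_ifs <;> rfl

-- ===== VERDICT =====
theorem get_dora_tiles_spec : Claim_equal_get_dora_tiles := by
  intro dorahyo _
  unfold Spec_get_dora_tiles get_dora_tiles get_dora_tiles_alt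
  split_ifs with he
  · simp [he]
  · simp only [step_eq, PySem.List.foldl_append_singleton_eq_map, List.nil_append]
    exact List.map_congr_left (fun t _ => tile_eq t)
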